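-- pv_equiv track=rewrite | github.com/markodjukanovic90/VGLCS | src/beamsearch.py | build_prev_table
-- ===== SOURCE A (Python) =====
-- from typing import List, Tuple, Dict, Set, Iterable, Optional
--
-- def build_prev_table(sequences: List[str], Sigma: List[str]) -> List[Dict[str, List[int]]]:
--
--     Prev: List[Dict[str, List[int]]] = []
--
--     for s in sequences:
--         n = len(s)
--
--         # Prev za jednu sekvencu
--         prev_i: Dict[str, List[int]] = {
--             a: [-1] * (n + 1) for a in Sigma
--         }
--
--         # last[a] = posljednja pozicija znaka a prije trenutnog j
--         last = {a: -1 for a in Sigma}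
--
--         for j in range(n + 1):
--             # u ovom trenutku last[a] = max p < j
--             for a in Sigma:
--                 prev_i[a][j] = last[a]
--
--             if j < n:
--                 last[s[j]] = j
--
--         Prev.append(prev_i)
--
--     return Prev
-- ===== SOURCE B (Python) =====
-- def build_prev_table(sequences, Sigma):
--     # Occurrence-index then range-fill: one pass groups positions per symbol,
--     # then each symbol's row is filled interval by interval.
--     syms = list(dict.fromkeys(Sigma))
--     Prev = []
--     for s in sequences:
--         n = len(s)
--         occ = {}
--         for p, c in enumerate(s):
--             occ.setdefault(c, []).append(p)
--         prev_i = {}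
--         for a in syms:
--             ps = occ.get(a, [])
--             arr = [-1] * (n + 1)
--             for k, p in enumerate(ps):
--                 end = ps[k + 1] if k + 1 < len(ps) else n
--                 for j in range(p + 1, end + 1):
--                     arr[j] = p
--             prev_i[a] = arr
--         Prev.append(prev_i)
--     return Prev
-- ===== Notes on version B (the rewrite author's own statement) =====
-- stated objective: alternative
-- what changed: Instead of snapshotting a last-seen vector at every position j into every symbol's row, B builds an occurrence index (positions per symbol) in one pass over the sequence and then fills each symbol's row interval-by-interval between consecutive occurrences.
import Mathlib
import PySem

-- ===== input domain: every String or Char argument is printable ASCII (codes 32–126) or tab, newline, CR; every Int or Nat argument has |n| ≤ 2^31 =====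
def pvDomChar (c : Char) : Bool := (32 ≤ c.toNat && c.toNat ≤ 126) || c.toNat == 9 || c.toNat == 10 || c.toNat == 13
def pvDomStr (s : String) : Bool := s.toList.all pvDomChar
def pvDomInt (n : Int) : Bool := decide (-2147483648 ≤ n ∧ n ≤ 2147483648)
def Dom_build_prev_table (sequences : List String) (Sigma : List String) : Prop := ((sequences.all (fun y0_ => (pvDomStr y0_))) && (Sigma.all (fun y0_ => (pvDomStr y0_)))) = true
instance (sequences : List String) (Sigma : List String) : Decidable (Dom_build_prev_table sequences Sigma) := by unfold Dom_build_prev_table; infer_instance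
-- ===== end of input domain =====

-- B replaces A's per-position snapshot of the whole last-seen vector by an occurrence
-- index built in one pass, then fills each symbol's row interval-by-interval (objective: alternative algorithm).

-- ===== PORT A =====
-- literal transliteration; Python's `last[a]` lookup (key always present since a ∈ Sigma) is `getD a (-1)`,
-- and `s[j]` (0 ≤ j < n, always in range) is `(PySem.List.pyGet? cs j).getD ' '` — exact on all admitted inputs.
def build_prev_table (sequences : List String) (Sigma : List String) : List (List (String × List Int)) :=
  sequences.foldl (fun Prev s =>
    let cs := s.toList
    let n : Nat := cs.length
    let prev0 : PySem.Dict String (List Int) :=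
      Sigma.foldl (fun d a => d.insert a (List.replicate (n+1) (-1 : Int))) PySem.Dict.empty
    let last0 : PySem.Dict String Int :=
      Sigma.foldl (fun d a => d.insert a (-1 : Int)) PySem.Dict.empty
    let st := (PySem.List.pyRange 0 ((n : Int)+1) 1).foldl
      (fun (st : PySem.Dict String (List Int) × PySem.Dict String Int) j =>
        let prev := Sigma.foldl (fun p a => p.modify a [] (fun l => l.set j.toNat (st.2.getD a (-1)))) st.1
        let last := if j < (n : Int) then st.2.insert (String.ofList [(PySem.List.pyGet? cs j).getD ' ']) j else st.2
        (prev, last))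
      (prev0, last0)
    Prev ++ [st.1.items]) ([] : List (List (String × List Int)))

-- ===== PORT B =====
def build_prev_table_alt (sequences : List String) (Sigma : List String) : List (List (String × List Int)) :=
  let syms := PySem.List.dedup Sigma
  sequences.map (fun s =>
    let cs := s.toList
    let n : Nat := cs.length
    let occ : PySem.Dict String (List Int) :=
      (PySem.List.enumerate cs).foldl
        (fun d pc => d.modify (String.ofList [pc.2]) [] (fun l => l ++ [pc.1])) PySem.Dict.empty
    syms.map (fun a =>
      let ps := occ.getD a []
      let arr := (PySem.List.enumerate ps).foldl (fun arr kp =>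
        let e : Int := if kp.1 + 1 < (ps.length : Int) then PySem.List.pyGetD ps (kp.1 + 1) 0 else (n : Int)
        (PySem.List.pyRange (kp.2 + 1) (e + 1) 1).foldl (fun arr j => arr.set j.toNat kp.2) arr)
        (List.replicate (n+1) (-1 : Int))
      (a, arr)))

-- ===== PRECONDITION & SPEC =====
def Spec_build_prev_table (sequences : List String) (Sigma : List String) (out : List (List (String × List Int))) : Prop := out = build_prev_table_alt sequences Sigma
instance (sequences : List String) (Sigma : List String) (out : List (List (String × List Int))) : Decidable (Spec_build_prev_table sequences Sigma out) := by unfold Spec_build_prev_table; infer_instance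

-- ===== CLAIM (what is proved, stated in full; the proofs are below) =====
def Claim_equal_build_prev_table : Prop := ∀ (sequences : List String) (Sigma : List String), Dom_build_prev_table sequences Sigma → Spec_build_prev_table sequences Sigma (build_prev_table sequences Sigma)

-- ===== LEMMAS AND PROOFS =====

-- positions (as Ints, ascending) at which the single-char symbol a occurs in cs
def posL (cs : List Char) (a : String) : List Int :=
  ((PySem.List.enumerate cs).filter (fun pc => String.ofList [pc.2] == a)).map (·.1)

-- last occurrence strictly before j (−1 if none), read off an ascending position list
def lastLt (ps : List Int) (j : Int) : Int :=
  ps.foldl (fun acc p => if p < j then p else acc) (-1)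

-- the common value of both per-sequence rows
def refRow (cs : List Char) (a : String) : List Int :=
  (List.range (cs.length + 1)).map (fun (i : Nat) => lastLt (posL cs a) (i : Int))

theorem lastLt_append (qs : List Int) (q j : Int) :
    lastLt (qs ++ [q]) j = if q < j then q else lastLt qs j := by
  simp [lastLt]

theorem lastLt_nonpos (ps : List Int) (hnn : ∀ p ∈ ps, 0 ≤ p) (j : Int) (hj : j ≤ 0) :
    lastLt ps j = -1 := by
  induction ps using List.reverseRecOn with
  | nil => rfl
  | append_singleton qs q ih =>
    rw [lastLt_append, if_neg (by have := hnn q (by simp); omega),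
      ih (fun p hp => hnn p (by simp [hp]))]

theorem lastLt_succ (ps : List Int) (hasc : ps.Pairwise (· < ·)) (j : Int) :
    lastLt ps (j + 1) = if j ∈ ps then j else lastLt ps j := by
  induction ps using List.reverseRecOn with
  | nil => simp [lastLt]
  | append_singleton qs q ih =>
    have hq := (List.pairwise_append.mp hasc).2.2
    have hqs := (List.pairwise_append.mp hasc).1
    rw [lastLt_append, lastLt_append, ih hqs]
    by_cases h1 : q = j
    · subst h1; simp
    · have hjq : j ∈ qs → j < q := by intro hm; simpa using hq j hm q (by simp)
      by_cases h2 : q < j + 1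
      · have hqj : q < j := lt_of_le_of_ne (by omega) h1
        have : j ∉ qs := fun hm => absurd (hjq hm) (by omega)
        simp [h2, this, hqj, Ne.symm h1]
      · have : ¬ q < j := by omega
        simp [h2, this, Ne.symm h1]

theorem posL_pairwise (cs : List Char) (a : String) : (posL cs a).Pairwise (· < ·) := by
  unfold posL
  refine List.Pairwise.map _ (fun p q h => h) ?_
  exact (PySem.List.pairwise_lt_enumerate cs 0).filter _

theorem posL_mem_range (cs : List Char) (a : String) :
    ∀ p ∈ posL cs a, 0 ≤ p ∧ p < (cs.length : Int) := by
  intro p hp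
  simp only [posL, List.mem_map, List.mem_filter] at hp
  obtain ⟨pc, ⟨hm, _⟩, rfl⟩ := hp
  rw [PySem.List.mem_enumerate_iff] at hm
  obtain ⟨k, hk, rfl⟩ := hm
  refine ⟨by simp, ?_⟩
  simp
  omega

theorem mem_posL (cs : List Char) (a : String) (k : Nat) (hk : k < cs.length) :
    ((k : Int) ∈ posL cs a ↔ String.ofList [cs[k]] = a) := by
  simp only [posL, List.mem_map, List.mem_filter, PySem.List.mem_enumerate_iff]
  constructor
  · rintro ⟨pc, ⟨⟨k', hk', rfl⟩, hbeq⟩, hfst⟩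
    simp only [zero_add] at hfst ⊢
    have : k' = k := by exact_mod_cast hfst
    subst this
    simpa using hbeq
  · intro h
    exact ⟨((k : Int), cs[k]), ⟨⟨k, hk, by simp⟩, by simpa using h⟩, rfl⟩

-- ===== B-side lemmas =====

theorem occ_getD (cs : List Char) (a : String) :
    ((PySem.List.enumerate cs).foldl
        (fun d pc => d.modify (String.ofList [pc.2]) [] (fun l => l ++ [pc.1]))
        PySem.Dict.empty).getD a [] = posL cs a := by
  have h1 : (PySem.List.enumerate cs).foldl
        (fun d pc => d.modify (String.ofList [pc.2]) [] (fun l => l ++ [pc.1]))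
        PySem.Dict.empty
      = ((PySem.List.enumerate cs).map (fun pc => (String.ofList [pc.2], pc.1))).foldl
        (fun d p => d.modify p.1 [] (fun l => l ++ [p.2])) PySem.Dict.empty := by
    rw [List.foldl_map]
  rw [h1, PySem.Dict.getD_foldl_modify_append]
  simp [posL, List.filter_map, Function.comp_def, List.map_map]

def fillRange (a b v : Int) (arr : List Int) : List Int :=
  (PySem.List.pyRange a b 1).foldl (fun arr j => arr.set j.toNat v) arr

theorem length_fillRange (a b v : Int) (arr : List Int) :
    (fillRange a b v arr).length = arr.length := by
  unfold fillRange
  induction (PySem.List.pyRange a b 1) generalizing arr with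
  | nil => rfl
  | cons x xs ih => rw [List.foldl_cons, ih]; simp

theorem getElem?_fillRange (a b v : Int) (ha : 0 ≤ a) (arr : List Int) (i : Nat) :
    (fillRange a b v arr)[i]?
      = if a ≤ (i : Int) ∧ (i : Int) < b ∧ i < arr.length then some v else arr[i]? := by
  by_cases hba : b ≤ a
  · unfold fillRange
    rw [PySem.List.pyRange_one_eq_nil hba]
    simp only [List.foldl_nil]
    rw [if_neg (by omega)]
  · have hab : a < b := by omega
    unfold fillRange
    rw [PySem.List.pyRange_one_cons hab, List.foldl_cons]
    have := getElem?_fillRange (a+1) b v (by omega) (arr.set a.toNat v) i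
    unfold fillRange at this
    rw [this]
    by_cases hia : (i : Int) = a
    · have hnat : a.toNat = i := by omega
      subst hnat
      by_cases hlen : a.toNat < arr.length
      · rw [if_neg (by omega), List.getElem?_set_self']
        rw [if_pos (by simp; omega)]
        simp [hlen]
      · rw [List.set_eq_of_length_le (by omega)]
        rw [if_neg (by omega), if_neg (by omega)]
    · rw [List.getElem?_set_ne (by omega)]
      congr 1
      simp only [List.length_set, eq_iff_iff]
      constructor <;> (intro h; refine ⟨by omega, by omega, h.2.2⟩)
termination_by (b - a).toNat
decreasing_by omega

def chain (ps : List Int) (e : Int) : List (Int × Int) := ps.zip (ps.tail ++ [e])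

theorem chain_append (qs : List Int) (q e : Int) :
    chain (qs ++ [q]) e = chain qs q ++ [(q, e)] := by
  induction qs with
  | nil => rfl
  | cons x xs ih =>
    cases xs with
    | nil => rfl
    | cons y ys =>
      simp only [chain] at *
      simp only [List.cons_append, List.tail_cons, List.zip_cons_cons] at *
      rw [ih]

theorem enum_lookahead_eq_chain (ps : List Int) (n : Int) :
    (PySem.List.enumerate ps).map (fun kp =>
        (kp.2, if kp.1 + 1 < (ps.length : Int) then PySem.List.pyGetD ps (kp.1 + 1) 0 else n))
      = chain ps n := by
  apply List.ext_getElem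
  · simp [chain, PySem.List.length_enumerate]
    omega
  · intro k h1 h2
    simp only [List.getElem_map, PySem.List.getElem_enumerate, chain, List.getElem_zip]
    have hk : k < ps.length := by simpa [PySem.List.length_enumerate] using h1
    simp only [zero_add]
    congr 1
    by_cases hlast : k + 1 < ps.length
    · rw [if_pos (by exact_mod_cast (by omega : ((k+1 : Nat) : Int) < (ps.length : Int)))]
      rw [List.getElem_append_left (by simp; omega)]
      rw [List.getElem_tail]
      have : (k : Int) + 1 = ((k + 1 : Nat) : Int) := by push_cast; ring
      rw [this, PySem.List.pyGetD_natCast]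
      simp [List.getD_eq_getElem?_getD, List.getElem?_eq_getElem hlast]
    · rw [if_neg (by exact_mod_cast (by omega : ¬ ((k : Int) + 1 < (ps.length : Int))))]
      rw [List.getElem_append_right (by simp; omega)]
      simp

theorem chainFold_length (ps : List Int) (e : Int) (arr : List Int) :
    ((chain ps e).foldl (fun arr pe => fillRange (pe.1 + 1) (pe.2 + 1) pe.1 arr) arr).length
      = arr.length := by
  induction (chain ps e) generalizing arr with
  | nil => rfl
  | cons x xs ih => rw [List.foldl_cons, ih, length_fillRange]

theorem chainFold_getElem? (n : Nat) (ps : List Int) (e : Int)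
    (hasc : ps.Pairwise (· < ·)) (hnn : ∀ p ∈ ps, 0 ≤ p) (hlt : ∀ p ∈ ps, p < e)
    (he : e ≤ (n : Int)) (i : Nat) (hi : i ≤ n) :
    ((chain ps e).foldl (fun arr pe => fillRange (pe.1 + 1) (pe.2 + 1) pe.1 arr)
        (List.replicate (n+1) (-1 : Int)))[i]?
      = some (if (i : Int) ≤ e then lastLt ps i else -1) := by
  induction ps using List.reverseRecOn generalizing e with
  | nil =>
    simp only [chain, List.zip_nil_left, List.foldl_nil]
    rw [List.getElem?_replicate, if_pos (by omega)]
    simp [lastLt]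
  | append_singleton qs q ih =>
    rw [chain_append, List.foldl_append, List.foldl_cons, List.foldl_nil]
    have hq0 : 0 ≤ q := hnn q (by simp)
    have hqe : q < e := hlt q (by simp)
    have hqs_asc := (List.pairwise_append.mp hasc).1
    have hqs_lt : ∀ p ∈ qs, p < q := by
      intro p hp
      simpa using (List.pairwise_append.mp hasc).2.2 p hp q (by simp)
    have hlen : ((chain qs q).foldl (fun arr pe => fillRange (pe.1 + 1) (pe.2 + 1) pe.1 arr)
        (List.replicate (n+1) (-1 : Int))).length = n + 1 := by
      rw [chainFold_length, List.length_replicate]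
    rw [getElem?_fillRange _ _ _ (by omega)]
    rw [hlen]
    rw [ih q hqs_asc (fun p hp => hnn p (by simp [hp])) hqs_lt (by omega)]
    rw [lastLt_append]
    by_cases h1 : q + 1 ≤ (i : Int) ∧ (i : Int) < e + 1 ∧ i < n + 1
    · rw [if_pos h1, if_pos (by omega), if_pos (by omega)]
    · rw [if_neg h1]
      push Not at h1
      by_cases h2 : (i : Int) ≤ q
      · rw [if_pos (by omega), if_pos (by omega), if_neg (by omega)]
      · have hie : ¬ (i : Int) ≤ e := by
          rcases lt_or_ge (i : Int) (e+1) with h | h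
          · exact absurd (h1 (by omega) h) (by omega)
          · omega
        rw [if_neg (by omega), if_neg hie]

-- B's per-symbol row equals refRow
theorem refRow_getElem? (cs : List Char) (a : String) (i : Nat) (h : i < cs.length + 1) :
    (refRow cs a)[i]? = some (lastLt (posL cs a) (i : Int)) := by
  unfold refRow
  rw [List.getElem?_map, List.getElem?_range h]
  rfl

theorem refRow_length (cs : List Char) (a : String) : (refRow cs a).length = cs.length + 1 := by
  simp [refRow]

theorem b_row (cs : List Char) (a : String) :
    (PySem.List.enumerate (posL cs a)).foldl (fun arr kp =>
        (PySem.List.pyRange (kp.2 + 1)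
          ((if kp.1 + 1 < ((posL cs a).length : Int)
            then PySem.List.pyGetD (posL cs a) (kp.1 + 1) 0 else (cs.length : Int)) + 1) 1).foldl
          (fun arr j => arr.set j.toNat kp.2) arr)
        (List.replicate (cs.length + 1) (-1 : Int))
      = refRow cs a := by
  have hfold : (PySem.List.enumerate (posL cs a)).foldl (fun arr kp =>
        (PySem.List.pyRange (kp.2 + 1)
          ((if kp.1 + 1 < ((posL cs a).length : Int)
            then PySem.List.pyGetD (posL cs a) (kp.1 + 1) 0 else (cs.length : Int)) + 1) 1).foldl
          (fun arr j => arr.set j.toNat kp.2) arr)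
        (List.replicate (cs.length + 1) (-1 : Int))
      = ((PySem.List.enumerate (posL cs a)).map (fun kp =>
          (kp.2, if kp.1 + 1 < ((posL cs a).length : Int)
            then PySem.List.pyGetD (posL cs a) (kp.1 + 1) 0 else (cs.length : Int)))).foldl
          (fun arr pe => fillRange (pe.1 + 1) (pe.2 + 1) pe.1 arr)
          (List.replicate (cs.length + 1) (-1 : Int)) := by
    rw [List.foldl_map]
    rfl
  rw [hfold, enum_lookahead_eq_chain]
  apply List.ext_getElem?
  intro i
  by_cases hi : i < cs.length + 1
  · rw [refRow_getElem? cs a i hi]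
    exact (chainFold_getElem? cs.length (posL cs a) (cs.length : Int)
      (posL_pairwise cs a) (fun p hp => (posL_mem_range cs a p hp).1)
      (fun p hp => (posL_mem_range cs a p hp).2) (le_refl _) i (by omega)).trans
      (by rw [if_pos (by exact_mod_cast Int.ofNat_le.mpr (by omega : i ≤ cs.length))])
  · rw [List.getElem?_eq_none (by rw [chainFold_length, List.length_replicate]; omega),
      List.getElem?_eq_none (by rw [refRow_length]; omega)]

-- ===== A-side lemmas =====

theorem foldl_insert_const_getD {ν : Type} (Sigma : List String) (v : ν) (d : PySem.Dict String ν) (b : String) (dflt : ν) :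
    (Sigma.foldl (fun d a => d.insert a v) d).getD b dflt
      = if b ∈ Sigma then v else d.getD b dflt := by
  induction Sigma using List.reverseRecOn generalizing d with
  | nil => simp
  | append_singleton qs q ih =>
    rw [List.foldl_append, List.foldl_cons, List.foldl_nil, PySem.Dict.getD_insert, ih]
    by_cases h : b = q
    · simp [h]
    · simp [h]

theorem foldl_modify_set_getD (Sigma : List String) (g : String → Int) (j : Nat)
    (d : PySem.Dict String (List Int)) (b : String) :
    (Sigma.foldl (fun p a => p.modify a [] (fun l => l.set j (g a))) d).getD b []
      = if b ∈ Sigma then (d.getD b []).set j (g b) else d.getD b [] := by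
  induction Sigma using List.reverseRecOn generalizing d with
  | nil => simp
  | append_singleton qs q ih =>
    rw [List.foldl_append, List.foldl_cons, List.foldl_nil, PySem.Dict.getD_modify]
    by_cases h : b = q
    · subst h
      rw [if_pos rfl, ih]
      by_cases h2 : b ∈ qs
      · rw [if_pos h2, List.set_set, if_pos (by simp)]
      · rw [if_neg h2, if_pos (by simp)]
    · rw [if_neg h, ih]
      by_cases h2 : b ∈ qs
      · rw [if_pos h2, if_pos (by simp [h2])]
      · rw [if_neg h2, if_neg (by simp [h2, h])]

theorem update_self (s : List String) (xs : List String) (h : ∀ x ∈ xs, x ∈ s) :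
    PySem.Set.update s xs = s := by
  rw [PySem.Set.update_eq_append_filter]
  have hf : (PySem.Set.ofList xs).filter (fun y => !(PySem.Set.contains s y)) = [] := by
    rw [List.filter_eq_nil_iff]
    intro y hy
    have hm : y ∈ xs := (PySem.Set.mem_ofList xs y).mp hy
    simp only [Bool.not_eq_true', PySem.Set.contains_eq_listContains]
    simp [h y hm]
  rw [hf, List.append_nil]

theorem keys_prev0 {ν : Type} (Sigma : List String) (v : ν) :
    ((Sigma.foldl (fun d a => d.insert a v) (PySem.Dict.empty : PySem.Dict String ν))).keys
      = PySem.List.dedup Sigma := by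
  rw [show (fun (d : PySem.Dict String ν) a => d.insert a v) = (fun d a => d.insert a ((fun (_ : PySem.Dict String ν) (_ : String) => v) d a)) from rfl,
    PySem.Dict.keys_foldl_insert]
  simp
  exact PySem.Set.update_nil_left Sigma

def aStep (cs : List Char) (Sigma : List String)
    (st : PySem.Dict String (List Int) × PySem.Dict String Int) (k : Nat) :
    PySem.Dict String (List Int) × PySem.Dict String Int :=
  (Sigma.foldl (fun p a => p.modify a [] (fun l => l.set ((k : Int)).toNat (st.2.getD a (-1)))) st.1,
   if (k : Int) < (cs.length : Int)
     then st.2.insert (String.ofList [(PySem.List.pyGet? cs (k : Int)).getD ' ']) (k : Int)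
     else st.2)

def aInit (cs : List Char) (Sigma : List String) :
    PySem.Dict String (List Int) × PySem.Dict String Int :=
  (Sigma.foldl (fun d a => d.insert a (List.replicate (cs.length+1) (-1 : Int))) PySem.Dict.empty,
   Sigma.foldl (fun d a => d.insert a (-1 : Int)) PySem.Dict.empty)

theorem mapIf_set (n m : Nat) (_hm : m < n + 1) (f : Nat → Int) :
    ((List.range (n+1)).map (fun (i : Nat) => if i < m then f i else -1)).set m (f m)
      = (List.range (n+1)).map (fun (i : Nat) => if i < m + 1 then f i else -1) := by
  apply List.ext_getElem
  · simp
  · intro i h1 h2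
    simp only [List.length_set, List.length_map, List.length_range] at h1
    rw [List.getElem_set]
    simp only [List.getElem_map, List.getElem_range]
    by_cases h : m = i
    · subst h; rw [if_pos rfl, if_pos (by omega)]
    · rw [if_neg h]
      by_cases h3 : i < m
      · rw [if_pos h3, if_pos (by omega)]
      · rw [if_neg h3, if_neg (by omega)]

theorem a_inv (cs : List Char) (Sigma : List String) (m : Nat) (hm : m ≤ cs.length + 1) :
    (((List.range m).foldl (aStep cs Sigma) (aInit cs Sigma)).1.keys = PySem.List.dedup Sigma)
    ∧ (∀ b ∈ Sigma, ((List.range m).foldl (aStep cs Sigma) (aInit cs Sigma)).1.getD b []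
        = (List.range (cs.length + 1)).map (fun (i : Nat) => if i < m then lastLt (posL cs b) (i : Int) else -1))
    ∧ (∀ b ∈ Sigma, ((List.range m).foldl (aStep cs Sigma) (aInit cs Sigma)).2.getD b (-1)
        = lastLt (posL cs b) ((min m cs.length : Nat) : Int)) := by
  induction m with
  | zero =>
    refine ⟨keys_prev0 Sigma _, ?_, ?_⟩
    · intro b hb
      simp only [List.range_zero, List.foldl_nil, aInit]
      rw [foldl_insert_const_getD, if_pos hb]
      apply List.ext_getElem
      · simp
      · intro i h1 h2
        simp only [List.getElem_replicate, List.getElem_map, List.getElem_range]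
        rw [if_neg (by omega)]
    · intro b hb
      simp only [List.range_zero, List.foldl_nil, aInit]
      rw [foldl_insert_const_getD, if_pos hb]
      rw [lastLt_nonpos (posL cs b) (fun p hp => (posL_mem_range cs b p hp).1) _ (by simp)]
  | succ m ih =>
    obtain ⟨ihk, ihp, ihl⟩ := ih (by omega)
    have hmn : m ≤ cs.length := by omega
    rw [List.range_succ, List.foldl_append, List.foldl_cons, List.foldl_nil]
    set F := (List.range m).foldl (aStep cs Sigma) (aInit cs Sigma) with hF
    refine ⟨?_, ?_, ?_⟩
    · show (Sigma.foldl (fun p a => p.modify a [] (fun l => l.set ((m : Int)).toNat (F.2.getD a (-1)))) F.1).keys = _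
      rw [show (fun (p : PySem.Dict String (List Int)) (a : String) => p.modify a [] (fun l => l.set ((m : Int)).toNat (F.2.getD a (-1))))
            = (fun p a => p.modify a [] ((fun (p : PySem.Dict String (List Int)) (a : String) => fun l => l.set ((m : Int)).toNat (F.2.getD a (-1))) p a)) from rfl,
        PySem.Dict.keys_foldl_modify, ihk]
      exact update_self _ _ (fun x hx => (PySem.List.mem_dedup Sigma x).mpr hx)
    · intro b hb
      show (Sigma.foldl (fun p a => p.modify a [] (fun l => l.set ((m : Int)).toNat (F.2.getD a (-1)))) F.1).getD b [] = _
      rw [show ((m : Int)).toNat = m by simp]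
      rw [foldl_modify_set_getD Sigma (fun a => F.2.getD a (-1)) m F.1 b, if_pos hb]
      rw [ihp b hb, ihl b hb]
      rw [min_eq_left hmn]
      exact mapIf_set cs.length m (by omega) (fun i => lastLt (posL cs b) (i : Int))
    · intro b hb
      show (if (m : Int) < (cs.length : Int)
          then F.2.insert (String.ofList [(PySem.List.pyGet? cs (m : Int)).getD ' ']) (m : Int)
          else F.2).getD b (-1) = _
      by_cases hlt : m < cs.length
      · rw [if_pos (by exact_mod_cast hlt)]
        rw [PySem.List.pyGet?_natCast, List.getElem?_eq_getElem hlt]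
        simp only [Option.getD_some]
        rw [PySem.Dict.getD_insert]
        have hsucc : ((min (m+1) cs.length : Nat) : Int) = (m : Int) + 1 := by
          rw [min_eq_left (by omega)]; push_cast; ring
        rw [hsucc, lastLt_succ (posL cs b) (posL_pairwise cs b) (m : Int)]
        by_cases hkey : b = String.ofList [cs[m]]
        · rw [if_pos hkey, if_pos ((mem_posL cs b m hlt).mpr hkey.symm)]
        · rw [if_neg hkey, if_neg (fun hmem => hkey (((mem_posL cs b m hlt).mp hmem).symm)),
            ihl b hb, min_eq_left hmn]
      · rw [if_neg (by exact_mod_cast hlt)]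
        rw [ihl b hb]
        congr 1
        omega

-- per-sequence value of port A
def aPer (Sigma : List String) (s : String) : List (String × List Int) :=
  ((PySem.List.pyRange 0 ((s.toList.length : Int) + 1) 1).foldl
    (fun (st : PySem.Dict String (List Int) × PySem.Dict String Int) j =>
      (Sigma.foldl (fun p a => p.modify a [] (fun l => l.set j.toNat (st.2.getD a (-1)))) st.1,
       if j < (s.toList.length : Int)
         then st.2.insert (String.ofList [(PySem.List.pyGet? s.toList j).getD ' ']) j
         else st.2))
    (aInit s.toList Sigma)).1.items

-- per-sequence value of port B
def bPer (Sigma : List String) (s : String) : List (String × List Int) :=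
  let cs := s.toList
  let n : Nat := cs.length
  let occ : PySem.Dict String (List Int) :=
    (PySem.List.enumerate cs).foldl
      (fun d pc => d.modify (String.ofList [pc.2]) [] (fun l => l ++ [pc.1])) PySem.Dict.empty
  (PySem.List.dedup Sigma).map (fun a =>
    let ps := occ.getD a []
    let arr := (PySem.List.enumerate ps).foldl (fun arr kp =>
      let e : Int := if kp.1 + 1 < (ps.length : Int) then PySem.List.pyGetD ps (kp.1 + 1) 0 else (n : Int)
      (PySem.List.pyRange (kp.2 + 1) (e + 1) 1).foldl (fun arr j => arr.set j.toNat kp.2) arr)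
      (List.replicate (n+1) (-1 : Int))
    (a, arr))

theorem aPer_eq (Sigma : List String) (s : String) :
    aPer Sigma s = (PySem.List.dedup Sigma).map (fun a => (a, refRow s.toList a)) := by
  unfold aPer
  rw [show ((s.toList.length : Int) + 1) = ((s.toList.length + 1 : Nat) : Int) by push_cast; ring,
    PySem.List.pyRange_zero_natCast, List.foldl_map]
  show ((List.range (s.toList.length + 1)).foldl (aStep s.toList Sigma) (aInit s.toList Sigma)).1.items = _
  obtain ⟨ihk, ihp, _⟩ := a_inv s.toList Sigma (s.toList.length + 1) (le_refl _)
  rw [PySem.Dict.items_eq_map_keys _ (by rw [ihk]; exact PySem.List.nodup_dedup Sigma) [], ihk]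
  apply List.map_congr_left
  intro a ha
  rw [ihp a ((PySem.List.mem_dedup Sigma a).mp ha)]
  refine congrArg (fun l => (a, l)) ?_
  unfold refRow
  apply List.map_congr_left
  intro i hi
  rw [if_pos (List.mem_range.mp hi)]

theorem bPer_eq (Sigma : List String) (s : String) :
    bPer Sigma s = (PySem.List.dedup Sigma).map (fun a => (a, refRow s.toList a)) := by
  simp only [bPer]
  apply List.map_congr_left
  intro a _
  rw [occ_getD s.toList a]
  exact congrArg (fun l => (a, l)) (b_row s.toList a)

-- ===== VERDICT (by name: the statement is the Claim_ definition above) =====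
theorem build_prev_table_spec : Claim_equal_build_prev_table := by
  intro sequences Sigma _
  show build_prev_table sequences Sigma = build_prev_table_alt sequences Sigma
  have hA : build_prev_table sequences Sigma = [] ++ sequences.map (aPer Sigma) :=
    PySem.List.foldl_append_singleton_eq_map (aPer Sigma) sequences []
  have hB : build_prev_table_alt sequences Sigma = sequences.map (bPer Sigma) := rfl
  rw [hA, hB, List.nil_append]
  apply List.map_congr_left
  intro s _
  rw [aPer_eq Sigma s, bPer_eq Sigma s]
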